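-- pv_equiv track=rewrite | github.com/C4L1nn/IQTAnd | pages/artist.py | _find_artist_track_by_name
-- ===== SOURCE A (Python) =====
-- def _find_artist_track_by_name(tracks: list, target_name: str):
--     norm_target = str(target_name or "").strip().lower()
--     if not norm_target:
--         return None
--     loose_match = None
--     for track in tracks or []:
--         if not isinstance(track, dict):
--             continue
--         title = str(track.get("title", "") or "").strip().lower()
--         if not title:
--             continue
--         if title == norm_target:
--             return track
--         if loose_match is None and (norm_target in title or title in norm_target):
--             loose_match = track
--     return loose_match
-- ===== SOURCE B (Python) =====
-- def _find_artist_track_by_name(tracks: list, target_name: str):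
--     norm_target = str(target_name or "").strip().lower()
--     if not norm_target:
--         return None
--     # build the normalized index once: (normalized title, track) for usable tracks
--     pairs = [(str(t.get("title", "") or "").strip().lower(), t)
--              for t in (tracks or []) if isinstance(t, dict)]
--     pairs = [(ti, t) for ti, t in pairs if ti]
--     exact = next((t for ti, t in pairs if ti == norm_target), None)
--     if exact is not None:
--         return exact
--     return next((t for ti, t in pairs
--                  if norm_target in ti or ti in norm_target), None)
-- ===== Notes on version B (the rewrite author's own statement) =====
-- stated objective: alternative
-- what changed: Replaces A's single loop with a loose_match accumulator by a pipeline: build a filtered list of (normalized title, track) pairs once, then look up the first exact match and, failing that, the first substring match with generator-based searches.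
import Mathlib
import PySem

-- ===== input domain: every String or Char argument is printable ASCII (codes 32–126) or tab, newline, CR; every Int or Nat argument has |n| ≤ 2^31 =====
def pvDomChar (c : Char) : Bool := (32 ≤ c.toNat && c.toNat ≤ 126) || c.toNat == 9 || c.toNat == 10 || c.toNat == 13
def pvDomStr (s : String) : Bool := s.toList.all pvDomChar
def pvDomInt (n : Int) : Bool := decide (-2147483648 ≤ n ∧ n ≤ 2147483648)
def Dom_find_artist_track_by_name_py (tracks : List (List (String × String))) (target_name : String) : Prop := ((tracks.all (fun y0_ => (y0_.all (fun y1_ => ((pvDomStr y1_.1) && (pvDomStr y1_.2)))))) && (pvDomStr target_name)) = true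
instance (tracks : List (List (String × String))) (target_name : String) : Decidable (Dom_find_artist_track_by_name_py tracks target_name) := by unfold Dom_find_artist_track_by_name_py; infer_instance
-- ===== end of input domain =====

-- B replaces A's single loop with a loose_match accumulator by a pipeline: build the
-- filtered (normalized title, track) pair list once, then two find?-style lookups.

-- shared normalization helper: str(x or "").strip().lower() on a string is strip+lower
def pvNorm (s : String) : List Char := PySem.Chars.lower (PySem.Chars.strip s.toList)

-- title lookup: str(track.get("title", "") or "").strip().lower()
def pvTitle (track : List (String × String)) : List Char :=
  pvNorm ((PySem.Dict.ofList track).getD "title" "")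

-- ===== PORT A =====
-- A's single loop, carrying the loose_match accumulator
def pvLoopA (nt : List Char) : List (List (String × String)) → Option (List (String × String)) → Option (List (String × String))
  | [], loose => loose
  | t :: rest, loose =>
      let title := pvTitle t
      if title = [] then pvLoopA nt rest loose
      else if title = nt then some t
      else pvLoopA nt rest
        (if loose = none ∧ (PySem.Chars.isIn nt title ∨ PySem.Chars.isIn title nt) then some t else loose)

def find_artist_track_by_name_py (tracks : List (List (String × String))) (target_name : String) : Option (List (String × String)) :=
  let norm_target := pvNorm target_name
  if norm_target = [] then none
  else pvLoopA norm_target tracks none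

-- ===== PORT B =====
-- the filtered pair list: (normalized title, track), dropping empty titles
def pvPairs (tracks : List (List (String × String))) : List (List Char × List (String × String)) :=
  (tracks.map (fun t => (pvTitle t, t))).filter (fun p => !p.1.isEmpty)

def find_artist_track_by_name_py_alt (tracks : List (List (String × String))) (target_name : String) : Option (List (String × String)) :=
  let norm_target := pvNorm target_name
  if norm_target = [] then none
  else
    let pairs := pvPairs tracks
    match (pairs.find? (fun p => p.1 == norm_target)).map Prod.snd with
    | some t => some t
    | none =>
        (pairs.find? (fun p => PySem.Chars.isIn norm_target p.1 || PySem.Chars.isIn p.1 norm_target)).map Prod.snd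

-- ===== PRECONDITION & SPEC =====
def Spec_find_artist_track_by_name_py (tracks : List (List (String × String))) (target_name : String) (out : Option (List (String × String))) : Prop := out = find_artist_track_by_name_py_alt tracks target_name
instance (tracks : List (List (String × String))) (target_name : String) (out : Option (List (String × String))) : Decidable (Spec_find_artist_track_by_name_py tracks target_name out) := by unfold Spec_find_artist_track_by_name_py; infer_instance

-- ===== CLAIM (what is proved, stated in full; the proofs are below) =====
def Claim_equal_find_artist_track_by_name_py : Prop := ∀ (tracks : List (List (String × String))) (target_name : String), Dom_find_artist_track_by_name_py tracks target_name → Spec_find_artist_track_by_name_py tracks target_name (find_artist_track_by_name_py tracks target_name)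

-- ===== LEMMAS AND PROOFS =====

-- once loose_match is set, A's loop returns it unless a later exact match wins
theorem pvLoopA_some (nt : List Char) (ts : List (List (String × String))) (l : List (String × String)) :
    pvLoopA nt ts (some l) =
      match ((pvPairs ts).find? (fun p => p.1 == nt)).map Prod.snd with
      | some t => some t | none => some l := by
  induction ts with
  | nil => rfl
  | cons t rest ih =>
      simp only [pvLoopA, pvPairs, List.map_cons, List.filter_cons]
      by_cases h1 : pvTitle t = []
      · simp [h1, ih, pvPairs]
      · by_cases h2 : pvTitle t = nt
        · have hn : ¬ nt = [] := by rw [← h2]; exact h1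
          simp [hn, h2]
        · simp [h1, h2, ih, pvPairs]

-- A's loop from an empty accumulator is B's pair-list with its two lookups
theorem pvLoopA_none (nt : List Char) (ts : List (List (String × String))) :
    pvLoopA nt ts none =
      match ((pvPairs ts).find? (fun p => p.1 == nt)).map Prod.snd with
      | some t => some t
      | none => ((pvPairs ts).find? (fun p => PySem.Chars.isIn nt p.1 || PySem.Chars.isIn p.1 nt)).map Prod.snd := by
  induction ts with
  | nil => rfl
  | cons t rest ih =>
      simp only [pvLoopA, pvPairs, List.map_cons, List.filter_cons]
      by_cases h1 : pvTitle t = []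
      · simp [h1, ih, pvPairs]
      · by_cases h2 : pvTitle t = nt
        · have hn : ¬ nt = [] := by rw [← h2]; exact h1
          simp [hn, h2]
        · by_cases hin : PySem.Chars.isIn nt (pvTitle t) ∨ PySem.Chars.isIn (pvTitle t) nt
          · simp [h1, h2, hin, pvLoopA_some, pvPairs]
          · simp [h1, h2, hin, ih, pvPairs]

-- ===== VERDICT (by name: the statement is the Claim_ definition above) =====
theorem find_artist_track_by_name_py_spec : Claim_equal_find_artist_track_by_name_py := by
  intro tracks target_name _
  unfold Spec_find_artist_track_by_name_py find_artist_track_by_name_py find_artist_track_by_name_py_alt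
  by_cases h : pvNorm target_name = []
  · simp [h]
  · simp [h, pvLoopA_none]
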